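-- pv_equiv track=rewrite | github.com/maxiwelian/modelling_qs | utils/plotting/plotting_utils.py | convert_to_label
-- ===== SOURCE A (Python) =====
-- def convert_to_label(string):
--     new_string = '$\mathrm{'
--     for el in string:
--         if el == '_':
--             new_string += '\_'
--         elif el == ' ':
--             new_string += '\,\,'
--         elif el == '%':
--             new_string += '\%'
--         elif el == '-':
--             new_string += '}-\mathrm{'
--         else:
--             new_string += el
--     new_string += '}$'
--     return new_string
-- ===== SOURCE B (Python) =====
-- def convert_to_label(string):
--     inner = (string.replace('_', '\\_')
--                    .replace(' ', '\\,\\,')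
--                    .replace('%', '\\%')
--                    .replace('-', '}-\\mathrm{'))
--     return '$\\mathrm{' + inner + '}$'
-- ===== Notes on version B (the rewrite author's own statement) =====
-- stated objective: idiomatic
-- what changed: Replaced the per-character classification loop with four ordered str.replace passes over the whole string (order chosen so no replacement output is re-matched by a later pass), then wrapped the result.
import Mathlib
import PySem

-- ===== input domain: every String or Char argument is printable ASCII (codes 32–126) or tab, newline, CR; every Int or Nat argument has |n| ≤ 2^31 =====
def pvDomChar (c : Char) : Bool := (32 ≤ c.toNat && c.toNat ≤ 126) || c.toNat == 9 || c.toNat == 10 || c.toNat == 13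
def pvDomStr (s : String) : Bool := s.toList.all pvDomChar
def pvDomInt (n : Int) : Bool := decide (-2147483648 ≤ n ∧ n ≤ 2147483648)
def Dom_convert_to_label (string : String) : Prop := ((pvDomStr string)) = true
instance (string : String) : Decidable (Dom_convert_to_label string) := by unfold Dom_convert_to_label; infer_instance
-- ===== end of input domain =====

-- B replaces A's per-character classification loop with four ordered full-string replace passes (idiomatic; same cost).

-- ===== PORT A =====
def convert_to_label (string : String) : String :=
  let new_string := "$\\mathrm{"
  let new_string := string.toList.foldl (fun acc el =>
    if el == '_' then acc ++ "\\_"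
    else if el == ' ' then acc ++ "\\,\\,"
    else if el == '%' then acc ++ "\\%"
    else if el == '-' then acc ++ "}-\\mathrm{"
    else acc ++ String.ofList [el]) new_string
  new_string ++ "}$"

-- ===== PORT B =====
def convert_to_label_alt (string : String) : String :=
  let inner :=
    PySem.Str.replace
      (PySem.Str.replace
        (PySem.Str.replace
          (PySem.Str.replace string "_" "\\_")
          " " "\\,\\,")
        "%" "\\%")
      "-" "}-\\mathrm{"
  "$\\mathrm{" ++ inner ++ "}$"

-- ===== PRECONDITION & SPEC =====
def Spec_convert_to_label (string : String) (out : String) : Prop := out = convert_to_label_alt string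
instance (string : String) (out : String) : Decidable (Spec_convert_to_label string out) := by unfold Spec_convert_to_label; infer_instance

-- ===== CLAIM (what is proved, stated in full; the proofs are below) =====
def Claim_equal_convert_to_label : Prop := ∀ (string : String), Dom_convert_to_label string → Spec_convert_to_label string (convert_to_label string)

-- ===== LEMMAS AND PROOFS =====

-- the per-character mapping that A's loop applies
def labelMap (el : Char) : List Char :=
  if el == '_' then "\\_".toList
  else if el == ' ' then "\\,\\,".toList
  else if el == '%' then "\\%".toList
  else if el == '-' then "}-\\mathrm{".toList
  else [el]

-- a single-character replace is a flatMap
lemma replace_go_single (c : Char) (new : List Char) :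
    ∀ (l : List Char) (fuel : Nat) (acc : List Char), l.length ≤ fuel →
      PySem.Chars.replace.go [c] new fuel l acc =
        acc.reverse ++ l.flatMap (fun x => if x == c then new else [x]) := by
  intro l
  induction l with
  | nil =>
    intro fuel acc _
    cases fuel <;> simp [PySem.Chars.replace.go]
  | cons c' t ih =>
    intro fuel acc h
    cases fuel with
    | zero => simp at h
    | succ f =>
      simp only [PySem.Chars.replace.go]
      by_cases hc : c = c'
      · subst hc
        simp only [List.isPrefixOf, BEq.rfl, Bool.and_self, if_true]
        rw [show List.drop [c].length (c :: t) = t from rfl]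
        rw [ih _ _ (Nat.le_of_succ_le_succ h)]
        simp
      · have hp : List.isPrefixOf [c] (c' :: t) = false := by
          simp [List.isPrefixOf, hc]
        rw [hp]
        rw [if_neg (by decide)]
        rw [ih _ _ (Nat.le_of_succ_le_succ h)]
        simp only [List.flatMap_cons, beq_iff_eq, if_neg (Ne.symm hc)]
        simp

lemma replace_single (s : List Char) (c : Char) (new : List Char) :
    PySem.Chars.replace s [c] new = s.flatMap (fun x => if x == c then new else [x]) := by
  rw [PySem.Chars.replace]
  rw [if_neg (by simp)]
  simpa using replace_go_single c new s s.length [] (le_refl _)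

-- composing the four per-character substitutions gives exactly A's mapping
lemma chain_eq_labelMap (x : Char) :
    ((if x == '_' then "\\_".toList else [x]).flatMap (fun y =>
      (if y == ' ' then "\\,\\,".toList else [y]).flatMap (fun z =>
        (if z == '%' then "\\%".toList else [z]).flatMap (fun w =>
          if w == '-' then "}-\\mathrm{".toList else [w])))) = labelMap x := by
  unfold labelMap
  by_cases h1 : x = '_'
  · subst h1; decide
  · by_cases h2 : x = ' '
    · subst h2; decide
    · by_cases h3 : x = '%'
      · subst h3; decide
      · by_cases h4 : x = '-'
        · subst h4; decide
        · simp [beq_iff_eq, h1, h2, h3, h4]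

-- A's loop accumulates exactly the flatMap of labelMap
lemma foldA (l : List Char) :
    ∀ (acc : String),
      (l.foldl (fun acc el =>
        if el == '_' then acc ++ "\\_"
        else if el == ' ' then acc ++ "\\,\\,"
        else if el == '%' then acc ++ "\\%"
        else if el == '-' then acc ++ "}-\\mathrm{"
        else acc ++ String.ofList [el]) acc).toList = acc.toList ++ l.flatMap labelMap := by
  induction l with
  | nil => intro acc; simp
  | cons c t ih =>
    intro acc
    simp only [List.foldl_cons, List.flatMap_cons]
    rw [ih]
    unfold labelMap
    split_ifs <;> simp

-- ===== VERDICT (by name: the statement is the Claim_ definition above) =====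
theorem convert_to_label_spec : Claim_equal_convert_to_label := by
  intro s _
  show Spec_convert_to_label s (convert_to_label s)
  unfold Spec_convert_to_label
  have h : (convert_to_label s).toList = (convert_to_label_alt s).toList := by
    unfold convert_to_label convert_to_label_alt
    simp only [PySem.Str.replace, String.toList_append, String.toList_ofList, foldA]
    rw [show ("_" : String).toList = ['_'] from rfl,
        show (" " : String).toList = [' '] from rfl,
        show ("%" : String).toList = ['%'] from rfl,
        show ("-" : String).toList = ['-'] from rfl]
    simp only [replace_single, List.flatMap_assoc]
    rw [List.flatMap_congr (fun x _ => chain_eq_labelMap x)]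
  calc convert_to_label s = String.ofList (convert_to_label s).toList := String.ofList_toList.symm
    _ = String.ofList (convert_to_label_alt s).toList := by rw [h]
    _ = convert_to_label_alt s := String.ofList_toList
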